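-- pv_equiv track=rewrite | github.com/free5ty1e/BeatSaberPcCustomSongToPs4InstallConverter | beat-saber-ps4-custom-songs/scripts/download_repo.py | check_difficulties
-- ===== SOURCE A (Python) =====
-- def check_difficulties(versions):
--     """Check if song has at least Easy, Normal, and Hard difficulties.
--
--     User requirement: Must NOT be Expert+ only.
--     We need at least Easy AND Normal AND Hard.
--     """
--     if not versions:
--         return False
--
--     latest = versions[0]
--     diffs = latest.get("diffs", [])
--
--     difficulties = set()
--     for diff in diffs:
--         difficulties.add(diff.get("difficulty", "").lower())
--
--     has_easy = any("easy" in d for d in difficulties)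
--     has_normal = any("normal" in d for d in difficulties)
--     has_hard = any("hard" in d for d in difficulties)
--
--     # Must have at least Easy+Normal+Hard (not Expert+ only)
--     return has_easy and has_normal and has_hard
-- ===== SOURCE B (Python) =====
-- def check_difficulties(versions):
--     """Check if song has at least Easy, Normal, and Hard difficulties."""
--     if not versions:
--         return False
--     missing = ["easy", "normal", "hard"]
--     for diff in versions[0].get("diffs", []):
--         d = diff.get("difficulty", "").lower()
--         missing = [m for m in missing if m not in d]
--         if not missing:
--             return True
--     return False
-- ===== Notes on version B (the rewrite author's own statement) =====
-- stated objective: alternative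
-- what changed: Instead of building a set of found difficulty names and running three any-scans, B maintains the shrinking list of still-missing required substrings, filters it against each diff, and returns True early the moment it empties.
import Mathlib
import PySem

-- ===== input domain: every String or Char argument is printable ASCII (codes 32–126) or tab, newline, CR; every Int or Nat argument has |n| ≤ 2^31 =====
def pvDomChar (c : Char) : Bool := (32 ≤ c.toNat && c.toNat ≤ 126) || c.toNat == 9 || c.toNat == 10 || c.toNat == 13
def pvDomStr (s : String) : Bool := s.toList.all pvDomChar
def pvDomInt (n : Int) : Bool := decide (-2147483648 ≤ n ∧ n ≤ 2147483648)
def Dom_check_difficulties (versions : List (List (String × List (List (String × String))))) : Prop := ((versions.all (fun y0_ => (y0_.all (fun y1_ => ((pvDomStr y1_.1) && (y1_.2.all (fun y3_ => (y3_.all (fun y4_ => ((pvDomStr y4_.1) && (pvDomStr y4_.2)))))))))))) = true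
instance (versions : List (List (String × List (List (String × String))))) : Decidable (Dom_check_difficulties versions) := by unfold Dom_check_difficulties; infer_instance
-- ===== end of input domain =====

-- B replaces the found-difficulties set and three any-scans by a shrinking list of still-missing
-- required substrings, filtered against each diff with an early True when it empties (alternative).

-- ===== PORT A =====
def check_difficulties (versions : List (List (String × List (List (String × String))))) : Bool :=
  match versions with
  | [] => false
  | latest :: _ =>
    let diffs := (PySem.Dict.mk latest).getD "diffs" []
    let difficulties : PySem.Set String :=
      diffs.foldl (fun s diff =>
        PySem.Set.add s (PySem.Str.lower ((PySem.Dict.mk diff).getD "difficulty" ""))) PySem.Set.empty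
    let has_easy := difficulties.any (fun d => PySem.Str.isIn "easy" d)
    let has_normal := difficulties.any (fun d => PySem.Str.isIn "normal" d)
    let has_hard := difficulties.any (fun d => PySem.Str.isIn "hard" d)
    has_easy && has_normal && has_hard

-- ===== PORT B =====
-- loop over diffs, carrying the still-missing substrings; early True when none remain
def check_alt_loop (diffs : List (List (String × String))) (missing : List String) : Bool :=
  match diffs with
  | [] => false
  | diff :: rest =>
    let d := PySem.Str.lower ((PySem.Dict.mk diff).getD "difficulty" "")
    let missing' := missing.filter (fun m => !(PySem.Str.isIn m d))
    if missing'.isEmpty then true else check_alt_loop rest missing'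

def check_difficulties_alt (versions : List (List (String × List (List (String × String))))) : Bool :=
  match versions with
  | [] => false
  | latest :: _ =>
    check_alt_loop ((PySem.Dict.mk latest).getD "diffs" []) ["easy", "normal", "hard"]

-- ===== PRECONDITION & SPEC =====
def Spec_check_difficulties (versions : List (List (String × List (List (String × String))))) (out : Bool) : Prop := out = check_difficulties_alt versions
instance (versions : List (List (String × List (List (String × String))))) (out : Bool) : Decidable (Spec_check_difficulties versions out) := by unfold Spec_check_difficulties; infer_instance

-- ===== CLAIM (what is proved, stated in full; the proofs are below) =====
def Claim_equal_check_difficulties : Prop := ∀ (versions : List (List (String × List (List (String × String))))), Dom_check_difficulties versions → Spec_check_difficulties versions (check_difficulties versions)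

-- ===== LEMMAS AND PROOFS =====

-- any over Set.add: adding an element (dedup or not) is absorbed into the disjunction.
theorem any_set_add {α : Type} [BEq α] [LawfulBEq α] (s : PySem.Set α) (x : α) (p : α → Bool) :
    (PySem.Set.add s x).any p = (s.any p || p x) := by
  simp only [PySem.Set.add]
  split
  · rename_i hc
    have hm : x ∈ s := List.mem_of_elem_eq_true hc
    by_cases hp : p x
    · have hs : s.any p = true := List.any_eq_true.mpr ⟨x, hm, hp⟩
      simp [hs, hp]
    · simp [hp]
  · simp [List.any_append]

-- A's set-build-then-scan: any over the accumulated set equals any over the mapped list.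
theorem any_foldl_set_add {α β : Type} [BEq α] [LawfulBEq α] (g : β → α) (p : α → Bool)
    (l : List β) (s : PySem.Set α) :
    (l.foldl (fun s b => PySem.Set.add s (g b)) s).any p = (s.any p || l.any (fun b => p (g b))) := by
  induction l generalizing s with
  | nil => simp
  | cons b t ih =>
    simp only [List.foldl_cons, ih, any_set_add, List.any_cons]
    cases s.any p <;> cases p (g b) <;> simp

-- all over a negative filter merges the filter predicate disjunctively.
theorem all_filter_not {α : Type} (q r : α → Bool) (l : List α) :
    (l.filter (fun m => !q m)).all r = l.all (fun m => q m || r m) := by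
  induction l with
  | nil => rfl
  | cons a t ih => by_cases h : q a <;> simp [h, ih]

-- B's loop with a nonempty missing list answers: every missing substring occurs in some diff.
theorem check_alt_loop_eq (diffs : List (List (String × String))) (missing : List String)
    (hne : missing ≠ []) :
    check_alt_loop diffs missing
      = missing.all (fun m => diffs.any (fun diff =>
          PySem.Str.isIn m (PySem.Str.lower ((PySem.Dict.mk diff).getD "difficulty" "")))) := by
  induction diffs generalizing missing with
  | nil =>
    simp only [check_alt_loop, List.any_nil]
    cases missing with
    | nil => exact absurd rfl hne
    | cons a t => simp
  | cons diff rest ih =>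
    simp only [check_alt_loop]
    set d := PySem.Str.lower ((PySem.Dict.mk diff).getD "difficulty" "") with hd
    by_cases he : (missing.filter (fun m => !(PySem.Str.isIn m d))).isEmpty = true
    · -- all missing matched by this diff: both sides true
      simp only [he, if_pos]
      have hall : ∀ m ∈ missing, PySem.Str.isIn m d = true := by
        intro m hm
        by_contra hf
        have hmem : m ∈ missing.filter (fun m => !(PySem.Str.isIn m d)) :=
          List.mem_filter.mpr ⟨hm, by rw [Bool.not_eq_true', Bool.eq_false_iff]; exact hf⟩
        rw [List.isEmpty_iff] at he
        rw [he] at hmem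
        exact absurd hmem (List.not_mem_nil)
      symm
      refine List.all_eq_true.mpr ?_
      intro m hm
      exact List.any_eq_true.mpr ⟨diff, List.mem_cons_self, hall m hm⟩
    · simp only [he, if_neg, Bool.false_eq_true, not_false_eq_true]
      rw [ih _ (by simpa [List.isEmpty_iff] using he)]
      rw [all_filter_not]
      simp only [List.any_cons, ← hd]

-- ===== VERDICT (by name: the statement is the Claim_ definition above) =====
theorem check_difficulties_spec : Claim_equal_check_difficulties := by
  intro versions _
  unfold Spec_check_difficulties check_difficulties check_difficulties_alt
  match versions with
  | [] => rfl
  | latest :: rest =>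
    simp only
    rw [check_alt_loop_eq _ _ (by simp)]
    rw [any_foldl_set_add (g := fun diff => PySem.Str.lower ((PySem.Dict.mk diff).getD "difficulty" "")),
        any_foldl_set_add (g := fun diff => PySem.Str.lower ((PySem.Dict.mk diff).getD "difficulty" "")),
        any_foldl_set_add (g := fun diff => PySem.Str.lower ((PySem.Dict.mk diff).getD "difficulty" ""))]
    simp [PySem.Set.empty, Bool.and_comm, Bool.and_assoc]
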